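-- pv_equiv track=rewrite | github.com/tariqjamal057/ai_testcase_automation | genai_testgen_tool/angular_extractor.py | _extract_class_body
-- ===== SOURCE A (Python) =====
-- def _extract_class_body(content, start_pos):
--     """Extract the complete class body using brace matching."""
--     brace_count = 1
--     pos = start_pos + 1
--
--     while pos < len(content) and brace_count > 0:
--         if content[pos] == '{':
--             brace_count += 1
--         elif content[pos] == '}':
--             brace_count -= 1
--         pos += 1
--
--     return content[start_pos:pos] if brace_count == 0 else content[start_pos:]
-- ===== SOURCE B (Python) =====
-- def _extract_class_body(content, start_pos):
--     """Extract the complete class body using brace matching.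
--
--     B (recursive descent): skip(pos) consumes text until the '}' that closes
--     the block currently open at pos, calling itself to skip each nested
--     '{...}' block; it returns the index just past the closing '}', or None
--     if the block is never closed."""
--     n = len(content)
--
--     def skip(pos):
--         while pos < n:
--             c = content[pos]
--             if c == '}':
--                 return pos + 1
--             if c == '{':
--                 pos = skip(pos + 1)
--                 if pos is None:
--                     return None
--             else:
--                 pos += 1
--         return None
--
--     end = skip(start_pos + 1)
--     return content[start_pos:end] if end is not None else content[start_pos:]
-- ===== Notes on version B (the rewrite author's own statement) =====
-- stated objective: alternative
-- what changed: B is a recursive-descent matcher: a helper skip(pos) consumes one balanced block, recursing for each nested '{...}' block and returning the index just past its matching '}', instead of A's single flat scan that maintains a brace_count integer.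
import Mathlib
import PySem

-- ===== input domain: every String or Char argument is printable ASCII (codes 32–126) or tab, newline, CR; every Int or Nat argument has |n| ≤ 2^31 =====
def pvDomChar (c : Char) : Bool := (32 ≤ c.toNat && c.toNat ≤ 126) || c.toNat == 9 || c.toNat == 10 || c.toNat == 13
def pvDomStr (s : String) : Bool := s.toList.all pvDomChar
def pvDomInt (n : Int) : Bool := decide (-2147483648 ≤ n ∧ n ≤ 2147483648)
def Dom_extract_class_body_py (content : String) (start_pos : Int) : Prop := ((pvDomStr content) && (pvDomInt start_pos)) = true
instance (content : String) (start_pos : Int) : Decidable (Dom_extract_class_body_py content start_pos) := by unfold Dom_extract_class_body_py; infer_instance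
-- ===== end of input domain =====

-- B replaces A's flat scan with a brace_count integer by a recursive-descent matcher:
-- skip(pos) consumes one balanced block, recursing for each nested '{...}' block.

-- ===== PORT A =====
-- A's while loop; returns the final (pos, brace_count). 'none' from pyGet? is exactly where
-- Python raises IndexError (excluded by Pre_); the returned pair there is never used under Pre_.
def pvLoopA (content : String) (pos : Int) (brace : Int) : Int × Int :=
  if _h : pos < PySem.Str.len content ∧ 0 < brace then
    match PySem.Str.pyGet? content pos with
    | some c =>
        pvLoopA content (pos + 1)
          (if c = '{' then brace + 1 else if c = '}' then brace - 1 else brace)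
    | none => (pos, brace)
  else (pos, brace)
termination_by (PySem.Str.len content - pos).toNat
decreasing_by obtain ⟨h1, _⟩ := _h; omega

-- A's final return line: content[start_pos:pos] if brace_count == 0 else content[start_pos:]
def pvFinishA (content : String) (start_pos : Int) (r : Int × Int) : String :=
  if r.2 = 0 then PySem.Str.slice content (some start_pos) (some r.1)
  else PySem.Str.slice content (some start_pos) none

def extract_class_body_py (content : String) (start_pos : Int) : String :=
  pvFinishA content start_pos (pvLoopA content (start_pos + 1) 1)

-- ===== PORT B =====
-- B's helper skip: the inner while loop is the tail recursion, the nested-block recursion is the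
-- call at the returned index e. The Nat fuel only makes the recursion structural (it never runs out
-- when started with the fuel extract_class_body_py_alt supplies); 'none' from pyGet? is where
-- Python raises IndexError, outside Pre_.
def pvSkip (content : String) (fuel : Nat) (pos : Int) : Option Int :=
  match fuel with
  | 0 => none
  | fuel + 1 =>
    if pos < PySem.Str.len content then
      match PySem.Str.pyGet? content pos with
      | some c =>
          if c = '}' then some (pos + 1)
          else if c = '{' then
            match pvSkip content fuel (pos + 1) with
            | some e => pvSkip content fuel e
            | none => none
          else pvSkip content fuel (pos + 1)
      | none => none
    else none

def extract_class_body_py_alt (content : String) (start_pos : Int) : String :=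
  match pvSkip content ((PySem.Str.len content - start_pos).toNat + 1) (start_pos + 1) with
  | some e => PySem.Str.slice content (some start_pos) (some e)
  | none => PySem.Str.slice content (some start_pos) none

-- ===== PRECONDITION & SPEC =====
-- Pre_ excludes exactly the inputs on which the Python A raises IndexError (its first access
-- content[start_pos+1] with start_pos+1 < -len(content)); B raises there too.
def Pre_extract_class_body_py (content : String) (start_pos : Int) : Prop :=
  -(PySem.Str.len content) - 1 ≤ start_pos
instance (content : String) (start_pos : Int) : Decidable (Pre_extract_class_body_py content start_pos) := by
  unfold Pre_extract_class_body_py; infer_instance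

def pvWitness_extract_class_body_py : String × Int := ("class {a{b}c}", 6)

def Spec_extract_class_body_py (content : String) (start_pos : Int) (out : String) : Prop :=
  out = extract_class_body_py_alt content start_pos
instance (content : String) (start_pos : Int) (out : String) : Decidable (Spec_extract_class_body_py content start_pos out) := by
  unfold Spec_extract_class_body_py; infer_instance

-- ===== CLAIM (what is proved, stated in full; the proofs are below) =====
def Claim_equal_extract_class_body_py : Prop :=
  ∀ (content : String) (start_pos : Int), Dom_extract_class_body_py content start_pos →
    Pre_extract_class_body_py content start_pos →
    Spec_extract_class_body_py content start_pos (extract_class_body_py content start_pos)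

-- ===== LEMMAS AND PROOFS =====

-- Core correspondence between B's recursive descent and A's counting loop: with enough fuel and
-- pos in indexing range, a successful skip lands where A's loop closes one pending brace
-- (brace b ↦ b-1), and a failed skip means A's loop ends with all b pending braces still open.
lemma pv_skip_loop (content : String) :
    ∀ (fuel : Nat) (pos b : Int), -(PySem.Str.len content) ≤ pos → 1 ≤ b →
      (PySem.Str.len content - pos).toNat < fuel →
      ((∀ e : Int, pvSkip content fuel pos = some e →
          pos < e ∧ pvLoopA content pos b = pvLoopA content e (b - 1)) ∧
       (pvSkip content fuel pos = none → b ≤ (pvLoopA content pos b).2)) := by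
  intro fuel
  induction fuel with
  | zero => intro pos b _ _ hf; omega
  | succ fuel ih =>
    intro pos b hpos hb hf
    by_cases hlt : pos < PySem.Str.len content
    · obtain ⟨c, hc⟩ : ∃ c, PySem.Str.pyGet? content pos = some c := by
        cases hg : PySem.Str.pyGet? content pos with
        | some c => exact ⟨c, rfl⟩
        | none =>
          exfalso
          rw [PySem.Str.len_eq] at hlt hpos
          have := (PySem.List.pyGet?_eq_none_iff (xs := content.toList) (i := pos)).mp
            (by simpa [PySem.Str.pyGet?] using hg)
          exact this ⟨by omega, by omega⟩
      rw [pvSkip, if_pos hlt, hc, pvLoopA, dif_pos ⟨hlt, by omega⟩, hc]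
      simp only []
      by_cases h1 : c = '}'
      · subst h1
        rw [if_pos rfl, if_neg (by decide : ¬ ('}' : Char) = '{'), if_pos rfl]
        refine ⟨fun e he => ?_, fun he => by simp at he⟩
        obtain rfl : pos + 1 = e := Option.some.inj he
        exact ⟨by omega, rfl⟩
      · by_cases h2 : c = '{'
        · subst h2
          rw [if_neg (by decide : ¬ ('{' : Char) = '}'), if_pos rfl, if_pos rfl]
          have ih1 := ih (pos + 1) (b + 1) (by omega) (by omega) (by omega)
          cases hs1 : pvSkip content fuel (pos + 1) with
          | none =>
            simp only []
            refine ⟨fun e he => by simp at he, fun _ => ?_⟩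
            have := ih1.2 hs1
            omega
          | some e1 =>
            simp only []
            obtain ⟨he1lt, he1eq⟩ := ih1.1 e1 hs1
            have he1eq' : pvLoopA content (pos + 1) (b + 1) = pvLoopA content e1 b := by
              rw [he1eq]; norm_num
            have ih2 := ih e1 b (by omega) hb (by omega)
            cases hs2 : pvSkip content fuel e1 with
            | none =>
              refine ⟨fun e he => by simp at he, fun _ => ?_⟩
              have := ih2.2 hs2
              rw [he1eq']
              omega
            | some e2 =>
              obtain ⟨he2lt, he2eq⟩ := ih2.1 e2 hs2
              refine ⟨fun e he => ?_, fun he => by simp at he⟩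
              obtain rfl : e2 = e := Option.some.inj he
              exact ⟨by omega, by rw [he1eq', he2eq]⟩
        · rw [if_neg h1, if_neg h2, if_neg h2, if_neg h1]
          have ih1 := ih (pos + 1) b (by omega) hb (by omega)
          refine ⟨fun e he => ?_, ih1.2⟩
          obtain ⟨hlt2, heq⟩ := ih1.1 e he
          exact ⟨by omega, heq⟩
    · rw [pvSkip, if_neg hlt, pvLoopA, dif_neg (by omega)]
      exact ⟨fun e he => by simp at he, fun _ => le_refl b⟩

-- ===== VERDICT (by name: the statement is the Claim_ definition above) =====
theorem extract_class_body_py_spec : Claim_equal_extract_class_body_py := by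
  intro content start_pos _ hpre
  show extract_class_body_py content start_pos = extract_class_body_py_alt content start_pos
  have hlen : (0:Int) ≤ PySem.Str.len content := by
    rw [PySem.Str.len_eq]; positivity
  have h := pv_skip_loop content ((PySem.Str.len content - start_pos).toNat + 1)
      (start_pos + 1) 1 (by unfold Pre_extract_class_body_py at hpre; omega) (by omega) (by omega)
  unfold extract_class_body_py extract_class_body_py_alt
  cases hs : pvSkip content ((PySem.Str.len content - start_pos).toNat + 1) (start_pos + 1) with
  | some e =>
      obtain ⟨_, h2⟩ := h.1 e hs
      rw [h2, pvLoopA]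
      rw [dif_neg (by omega)]
      simp [pvFinishA]
  | none =>
      have h2 := h.2 hs
      unfold pvFinishA
      rw [if_neg (by omega)]
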